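-- pv_equiv track=rewrite | github.com/NoisNette/Codesignal-solutions | segmentSumsMatrix2.py | segmentSumsMatrix2
-- ===== SOURCE A (Python) =====
-- def segmentSumsMatrix2(inputArray):
--
--     answer = []
--     for i in range(len(inputArray)):
--         line = []
--         for j in range(len(inputArray)):
--             line.append(0)
--         answer.append(line)
--
--     for i in range(len(inputArray)):
--         answer[i][i] = inputArray[i]
--         for j in range(i + 1, len(inputArray)):
--             answer[i][j] = answer[i][j - 1] + inputArray[j]
--
--     for i in range(len(inputArray)):
--         for j in range(i + 1, len(inputArray)):
--             answer[j][i] = answer[i][j]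
--
--     return answer
-- ===== SOURCE B (Python) =====
-- def segmentSumsMatrix2(inputArray):
--     P = [0]
--     for x in inputArray:
--         P.append(P[-1] + x)
--     n = len(inputArray)
--     return [[P[max(i, j) + 1] - P[min(i, j)] for j in range(n)] for i in range(n)]
-- ===== Notes on version B (the rewrite author's own statement) =====
-- stated objective: simpler
-- what changed: Replaces the zero-matrix allocation, neighbour-dependent row recurrence and separate mirror-copy pass with one prefix-sum array and a direct fill answer[i][j] = P[max(i,j)+1] - P[min(i,j)].
import Mathlib
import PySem

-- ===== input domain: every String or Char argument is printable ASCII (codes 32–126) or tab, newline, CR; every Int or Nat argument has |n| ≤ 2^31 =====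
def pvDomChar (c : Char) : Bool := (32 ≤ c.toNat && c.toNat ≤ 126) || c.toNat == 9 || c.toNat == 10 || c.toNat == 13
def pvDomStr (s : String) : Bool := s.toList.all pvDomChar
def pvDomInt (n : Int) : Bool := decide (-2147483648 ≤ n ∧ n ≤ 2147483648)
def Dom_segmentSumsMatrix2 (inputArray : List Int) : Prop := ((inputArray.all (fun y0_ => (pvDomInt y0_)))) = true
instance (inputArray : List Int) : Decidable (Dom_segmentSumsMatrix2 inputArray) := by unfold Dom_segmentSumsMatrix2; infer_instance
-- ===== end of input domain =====

-- B replaces A's zero matrix + neighbour recurrence + mirror pass by one prefix-sum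
-- array and a direct fill answer[i][j] = P[max(i,j)+1] - P[min(i,j)] (simpler, same O(n^2)).

-- ===== PORT A =====
-- answer[i][j] = v  (i, j always produced by range(), hence in bounds: getD/set are exact here)
def pvSet2 (m : List (List Int)) (i j : Nat) (v : Int) : List (List Int) :=
  m.set i ((m.getD i []).set j v)
-- answer[i][j]  (indices in bounds on every use below)
def pvGet2 (m : List (List Int)) (i j : Nat) : Int :=
  (m.getD i []).getD j 0

def segmentSumsMatrix2 (inputArray : List Int) : List (List Int) :=
  let n := inputArray.length
  -- phase 1: build the n×n zero matrix by successive appends, as the Python loops do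
  let answer := (List.range n).foldl
    (fun a _ => a ++ [(List.range n).foldl (fun l _ => l ++ [(0 : Int)]) []]) []
  -- phase 2: diagonal, then each row's running segment sums
  let answer := (List.range n).foldl
    (fun a i =>
      let a := pvSet2 a i i (inputArray.getD i 0)
      (List.range' (i + 1) (n - (i + 1))).foldl
        (fun a j => pvSet2 a i j (pvGet2 a i (j - 1) + inputArray.getD j 0)) a) answer
  -- phase 3: mirror the upper triangle into the lower triangle
  (List.range n).foldl
    (fun a i =>
      (List.range' (i + 1) (n - (i + 1))).foldl
        (fun a j => pvSet2 a j i (pvGet2 a i j)) a) answer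

-- ===== PORT B =====
-- P[-1] : P is never empty, so Python's last-element access is exactly getLastD
def segmentSumsMatrix2_alt (inputArray : List Int) : List (List Int) :=
  let P := inputArray.foldl (fun p x => p ++ [p.getLastD 0 + x]) [(0 : Int)]
  let n := inputArray.length
  (List.range n).map (fun i => (List.range n).map (fun j =>
    P.getD (max i j + 1) 0 - P.getD (min i j) 0))

-- ===== PRECONDITION & SPEC =====
def Spec_segmentSumsMatrix2 (inputArray : List Int) (out : List (List Int)) : Prop := out = segmentSumsMatrix2_alt inputArray
instance (inputArray : List Int) (out : List (List Int)) : Decidable (Spec_segmentSumsMatrix2 inputArray out) := by unfold Spec_segmentSumsMatrix2; infer_instance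

-- ===== CLAIM (what is proved, stated in full; the proofs are below) =====
def Claim_equal_segmentSumsMatrix2 : Prop := ∀ (inputArray : List Int), Dom_segmentSumsMatrix2 inputArray → Spec_segmentSumsMatrix2 inputArray (segmentSumsMatrix2 inputArray)

-- ===== LEMMAS AND PROOFS =====

-- prefix sum of the first k elements
def pvS (xs : List Int) (k : Nat) : Int := (xs.take k).sum

-- an n×n matrix given by a function of the two indices
def pvTable (n : Nat) (f : Nat → Nat → Int) : List (List Int) :=
  (List.range n).map (fun i => (List.range n).map (fun j => f i j))

theorem pvTable_congr {n : Nat} {f g : Nat → Nat → Int}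
    (h : ∀ i j, i < n → j < n → f i j = g i j) : pvTable n f = pvTable n g := by
  unfold pvTable
  apply List.map_congr_left
  intro i hi
  simp only [List.mem_range] at hi
  apply List.map_congr_left
  intro j hj
  simp only [List.mem_range] at hj
  exact h i j hi hj

theorem pvGet2_table {n : Nat} {f : Nat → Nat → Int} {i j : Nat}
    (hi : i < n) (hj : j < n) : pvGet2 (pvTable n f) i j = f i j := by
  unfold pvGet2 pvTable
  rw [List.getD_eq_getElem?_getD, List.getD_eq_getElem?_getD]
  simp [hi, hj]

theorem pv_row_set {n : Nat} {g : Nat → Int} {j : Nat} (v : Int) (hj : j < n) :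
    ((List.range n).map g).set j v
      = (List.range n).map (fun c => if c = j then v else g c) := by
  apply List.ext_getElem
  · simp
  intro c h1 h2
  simp only [List.length_set, List.length_map, List.length_range] at h1
  rw [List.getElem_set]
  simp only [List.getElem_map, List.getElem_range]
  by_cases h : c = j
  · subst h; simp
  · rw [if_neg (fun hh => h hh.symm), if_neg h]

theorem pvSet2_table {n : Nat} {f : Nat → Nat → Int} {i j : Nat} (v : Int)
    (hi : i < n) (hj : j < n) :
    pvSet2 (pvTable n f) i j v
      = pvTable n (fun r c => if r = i ∧ c = j then v else f r c) := by
  unfold pvSet2 pvTable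
  rw [List.getD_eq_getElem?_getD]
  have hrow : (((List.range n).map fun i => (List.range n).map fun j => f i j)[i]?).getD []
      = (List.range n).map (f i) := by
    simp [List.getElem?_range, hi]
  rw [hrow, pv_row_set v hj]
  apply List.ext_getElem
  · simp
  intro r h1 h2
  simp only [List.length_set, List.length_map, List.length_range] at h1
  rw [List.getElem_set]
  simp only [List.getElem_map, List.getElem_range]
  by_cases h : i = r
  · subst h
    rw [if_pos rfl]
    apply List.map_congr_left
    intro c _
    by_cases hc : c = j
    · simp [hc]
    · simp [hc]
  · rw [if_neg h]
    apply List.map_congr_left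
    intro c _
    rw [if_neg (fun hh => h hh.1.symm)]

theorem pvS_succ (xs : List Int) (k : Nat) (hk : k < xs.length) :
    pvS xs (k + 1) = pvS xs k + xs.getD k 0 := by
  unfold pvS
  rw [List.take_succ, List.sum_append, List.getD_eq_getElem?_getD,
    List.getElem?_eq_getElem hk]
  simp

-- phase 1 builds the zero table
theorem pv_foldl_append_const {α β : Type} (c : β) :
    ∀ (l : List α) (acc : List β),
      l.foldl (fun a _ => a ++ [c]) acc = acc ++ List.replicate l.length c := by
  intro l
  induction l with
  | nil => simp
  | cons x t ih =>
    intro acc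
    rw [List.foldl_cons, ih]
    simp [List.replicate_succ, List.append_assoc]

theorem pv_phase1 (n : Nat) :
    (List.range n).foldl
      (fun a _ => a ++ [(List.range n).foldl (fun l _ => l ++ [(0 : Int)]) []]) []
      = pvTable n (fun _ _ => 0) := by
  rw [pv_foldl_append_const, pv_foldl_append_const]
  unfold pvTable
  simp [List.map_const']

-- the prefix array built by B
theorem pv_prefix (xs : List Int) :
    xs.foldl (fun p x => p ++ [p.getLastD 0 + x]) [(0 : Int)]
      = (List.range (xs.length + 1)).map (pvS xs) := by
  induction xs using List.reverseRecOn with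
  | nil => simp [pvS]
  | append_singleton t x ih =>
    rw [List.foldl_append, ih]
    simp only [List.foldl_cons, List.foldl_nil, List.length_append, List.length_singleton]
    conv_rhs => rw [List.range_succ, List.map_append]
    have hlast : ((List.range (t.length + 1)).map (pvS t)).getLastD 0 = pvS t t.length := by
      rw [List.range_succ, List.map_append]
      simp
    congr 1
    · apply List.map_congr_left
      intro k hk
      simp only [List.mem_range] at hk
      unfold pvS
      rw [List.take_append_of_le_length (by omega)]
    · rw [hlast]
      unfold pvS
      rw [List.take_length, List.map_singleton, List.take_of_length_le (by simp),
        List.sum_append]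
      simp

-- phase 2 inner loop: extends row i with running segment sums over range' s k
theorem pv_inner2 (xs : List Int) :
    ∀ (k s i : Nat) (f : Nat → Nat → Int), i < s → s + k ≤ xs.length →
      f i (s - 1) = pvS xs s - pvS xs i →
      (List.range' s k).foldl
        (fun a j => pvSet2 a i j (pvGet2 a i (j - 1) + xs.getD j 0))
        (pvTable xs.length f)
      = pvTable xs.length
          (fun r c => if r = i ∧ s ≤ c ∧ c < s + k then pvS xs (c + 1) - pvS xs i else f r c) := by
  intro k
  induction k with
  | zero =>
    intro s i f his hk hf
    simp only [List.range'_zero, List.foldl_nil]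
    apply pvTable_congr
    intro r c _ _
    split_ifs with h
    · omega
    · rfl
  | succ k ih =>
    intro s i f his hk hf
    rw [List.range'_succ, List.foldl_cons]
    have hi : i < xs.length := by omega
    have hs : s < xs.length := by omega
    have hs1 : s - 1 < xs.length := by omega
    rw [pvGet2_table hi hs1, hf, pvSet2_table _ hi hs]
    have hstep : pvS xs s - pvS xs i + xs.getD s 0 = pvS xs (s + 1) - pvS xs i := by
      rw [pvS_succ xs s hs]; ring
    rw [hstep]
    rw [ih (s + 1) i _ (by omega) (by omega) (by simp)]
    apply pvTable_congr
    intro r c _ _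
    split_ifs <;> simp_all <;> omega

-- phase 2 outer loop invariant function
def pvF (xs : List Int) (t : Nat) (r c : Nat) : Int :=
  if r < t ∧ r ≤ c then pvS xs (c + 1) - pvS xs r else 0

theorem pv_outer2 (xs : List Int) :
    ∀ (k t : Nat), t + k = xs.length →
      (List.range' t k).foldl
        (fun a i =>
          let a := pvSet2 a i i (xs.getD i 0)
          (List.range' (i + 1) (xs.length - (i + 1))).foldl
            (fun a j => pvSet2 a i j (pvGet2 a i (j - 1) + xs.getD j 0)) a)
        (pvTable xs.length (pvF xs t))
      = pvTable xs.length (pvF xs xs.length) := by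
  intro k
  induction k with
  | zero =>
    intro t ht
    simp only [List.range'_zero, List.foldl_nil]
    rw [show t = xs.length by omega]
  | succ k ih =>
    intro t ht
    rw [List.range'_succ, List.foldl_cons]
    have htl : t < xs.length := by omega
    simp only
    rw [pvSet2_table _ htl htl]
    have hdiag : xs.getD t 0 = pvS xs (t + 1) - pvS xs t := by
      rw [pvS_succ xs t htl]; ring
    rw [pv_inner2 xs (xs.length - (t + 1)) (t + 1) t _ (by omega) (by omega)
      (by show (if t = t ∧ t + 1 - 1 = t then xs.getD t 0
            else pvF xs t t (t + 1 - 1)) = pvS xs (t + 1) - pvS xs t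
          rw [if_pos ⟨rfl, rfl⟩]
          exact hdiag)]
    have hcongr : pvTable xs.length
        (fun r c => if r = t ∧ t + 1 ≤ c ∧ c < t + 1 + (xs.length - (t + 1))
            then pvS xs (c + 1) - pvS xs t
            else if r = t ∧ c = t then xs.getD t 0 else pvF xs t r c)
        = pvTable xs.length (pvF xs (t + 1)) := by
      apply pvTable_congr
      intro r c hr hc
      unfold pvF
      split_ifs <;> simp_all <;> omega
    rw [hcongr, ih (t + 1) (by omega)]

-- phase 3 inner loop: copies row i's upper entries into column i below the diagonal
theorem pv_inner3 (xs : List Int) :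
    ∀ (k s i : Nat) (f : Nat → Nat → Int), i < s → s + k ≤ xs.length →
      (∀ c, i ≤ c → c < xs.length → f i c = pvS xs (c + 1) - pvS xs i) →
      (List.range' s k).foldl
        (fun a j => pvSet2 a j i (pvGet2 a i j))
        (pvTable xs.length f)
      = pvTable xs.length
          (fun r c => if c = i ∧ s ≤ r ∧ r < s + k then pvS xs (r + 1) - pvS xs i else f r c) := by
  intro k
  induction k with
  | zero =>
    intro s i f his hk hf
    simp only [List.range'_zero, List.foldl_nil]
    apply pvTable_congr
    intro r c _ _
    split_ifs with h
    · omega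
    · rfl
  | succ k ih =>
    intro s i f his hk hf
    rw [List.range'_succ, List.foldl_cons]
    have hi : i < xs.length := by omega
    have hs : s < xs.length := by omega
    rw [pvGet2_table hi hs, hf s (by omega) hs, pvSet2_table _ hs hi]
    rw [ih (s + 1) i _ (by omega) (by omega)
      (fun c hc hc' => by
        have : ¬(i = s ∧ c = i) := by omega
        simp only [this, if_false]
        exact hf c hc hc')]
    apply pvTable_congr
    intro r c _ _
    split_ifs <;> simp_all <;> omega

-- phase 3 outer loop invariant function
def pvG (xs : List Int) (t : Nat) (r c : Nat) : Int :=
  if r ≤ c then pvS xs (c + 1) - pvS xs r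
  else if c < t then pvS xs (r + 1) - pvS xs c else 0

theorem pv_outer3 (xs : List Int) :
    ∀ (k t : Nat), t + k = xs.length →
      (List.range' t k).foldl
        (fun a i =>
          (List.range' (i + 1) (xs.length - (i + 1))).foldl
            (fun a j => pvSet2 a j i (pvGet2 a i j)) a)
        (pvTable xs.length (pvG xs t))
      = pvTable xs.length (pvG xs xs.length) := by
  intro k
  induction k with
  | zero =>
    intro t ht
    simp only [List.range'_zero, List.foldl_nil]
    rw [show t = xs.length by omega]
  | succ k ih =>
    intro t ht
    rw [List.range'_succ, List.foldl_cons]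
    have htl : t < xs.length := by omega
    rw [pv_inner3 xs (xs.length - (t + 1)) (t + 1) t _ (by omega) (by omega)
      (fun c hc hc' => by unfold pvG; simp [hc])]
    have hcongr : pvTable xs.length
        (fun r c => if c = t ∧ t + 1 ≤ r ∧ r < t + 1 + (xs.length - (t + 1))
            then pvS xs (r + 1) - pvS xs t else pvG xs t r c)
        = pvTable xs.length (pvG xs (t + 1)) := by
      apply pvTable_congr
      intro r c hr hc
      unfold pvG
      split_ifs <;> simp_all <;> omega
    rw [hcongr, ih (t + 1) (by omega)]

theorem pvA_eq_table (xs : List Int) :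
    segmentSumsMatrix2 xs = pvTable xs.length (pvG xs xs.length) := by
  unfold segmentSumsMatrix2
  simp only
  rw [pv_phase1]
  have h0 : pvTable xs.length (fun _ _ => (0 : Int)) = pvTable xs.length (pvF xs 0) := by
    apply pvTable_congr
    intro r c _ _
    unfold pvF
    split_ifs with h
    · omega
    · rfl
  rw [h0, List.range_eq_range']
  rw [pv_outer2 xs xs.length 0 (by omega)]
  have hFG : pvTable xs.length (pvF xs xs.length) = pvTable xs.length (pvG xs 0) := by
    apply pvTable_congr
    intro r c hr hc
    unfold pvF pvG
    split_ifs <;> simp_all <;> omega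
  rw [hFG]
  rw [pv_outer3 xs xs.length 0 (by omega)]

theorem pvB_eq_table (xs : List Int) :
    segmentSumsMatrix2_alt xs
      = pvTable xs.length (fun i j => pvS xs (max i j + 1) - pvS xs (min i j)) := by
  unfold segmentSumsMatrix2_alt
  simp only
  rw [pv_prefix]
  unfold pvTable
  apply List.map_congr_left
  intro i hi
  simp only [List.mem_range] at hi
  apply List.map_congr_left
  intro j hj
  simp only [List.mem_range] at hj
  have h1 : max i j + 1 < xs.length + 1 := by omega
  have h2 : min i j < xs.length + 1 := by omega
  rw [List.getD_eq_getElem?_getD, List.getD_eq_getElem?_getD]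
  simp [List.getElem?_range, h1, h2]

-- ===== VERDICT (by name: the statement is the Claim_ definition above) =====
theorem segmentSumsMatrix2_spec : Claim_equal_segmentSumsMatrix2 := by
  intro xs _
  unfold Spec_segmentSumsMatrix2
  rw [pvA_eq_table, pvB_eq_table]
  apply pvTable_congr
  intro r c hr hc
  unfold pvG
  by_cases h : r ≤ c
  · simp [h, Nat.max_eq_right h, Nat.min_eq_left h]
  · simp [h, hc, Nat.max_eq_left (by omega : c ≤ r), Nat.min_eq_right (by omega : c ≤ r)]
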